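-- pv_equiv track=rewrite | github.com/mfauzanalg/Mini-batch-Gradient-Descent | main2.py | TN
-- ===== SOURCE A (Python) =====
-- def TN(c_matrix, index):
--    count = 0
--    dim = len(c_matrix)
--    for i in range(dim):
--      for j in range(dim):
--        if (i != index or j != index):
--          count += 1
--    return count
-- ===== SOURCE B (Python) =====
-- def TN(c_matrix, index):
--     dim = len(c_matrix)
--     return dim * dim - (1 if 0 <= index < dim else 0)
-- ===== Notes on version B (the rewrite author's own statement) =====
-- stated objective: faster
-- what changed: Replaces the O(n^2) double loop that counts all (i,j) pairs except (index,index) with the closed form dim*dim minus 1 when 0 <= index < dim.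
import Mathlib
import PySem

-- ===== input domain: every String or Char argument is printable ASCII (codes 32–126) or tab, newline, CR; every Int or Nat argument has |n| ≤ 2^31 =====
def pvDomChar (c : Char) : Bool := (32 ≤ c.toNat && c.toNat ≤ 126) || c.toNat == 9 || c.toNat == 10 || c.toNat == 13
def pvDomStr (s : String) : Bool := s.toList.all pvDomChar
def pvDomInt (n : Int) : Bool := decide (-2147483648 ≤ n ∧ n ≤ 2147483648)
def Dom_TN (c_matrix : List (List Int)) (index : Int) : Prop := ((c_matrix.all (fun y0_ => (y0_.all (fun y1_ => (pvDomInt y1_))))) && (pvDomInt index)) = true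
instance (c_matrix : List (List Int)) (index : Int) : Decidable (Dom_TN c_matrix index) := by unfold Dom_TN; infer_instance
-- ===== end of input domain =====

-- B replaces A's O(n^2) double counting loop with the closed form dim*dim minus 1 when 0 ≤ index < dim.

-- ===== PORT A =====
def TN (c_matrix : List (List Int)) (index : Int) : Int :=
  let dim := c_matrix.length
  (PySem.List.pyRange 0 dim 1).foldl (fun count i =>
    (PySem.List.pyRange 0 dim 1).foldl (fun count j =>
      if i ≠ index ∨ j ≠ index then count + 1 else count) count) 0

-- ===== PORT B =====
def TN_alt (c_matrix : List (List Int)) (index : Int) : Int :=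
  let dim : Int := c_matrix.length
  dim * dim - (if 0 ≤ index ∧ index < dim then 1 else 0)

-- ===== PRECONDITION & SPEC =====
def Spec_TN (c_matrix : List (List Int)) (index : Int) (out : Int) : Prop := out = TN_alt c_matrix index
instance (c_matrix : List (List Int)) (index : Int) (out : Int) : Decidable (Spec_TN c_matrix index out) := by unfold Spec_TN; infer_instance

-- ===== CLAIM (what is proved, stated in full; the proofs are below) =====
def Claim_equal_TN : Prop := ∀ (c_matrix : List (List Int)) (index : Int), Dom_TN c_matrix index → Spec_TN c_matrix index (TN c_matrix index)

-- ===== LEMMAS AND PROOFS =====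

-- A's inner loop adds, to the accumulator, one per j in range(n) except when i = index = j.
theorem TN_inner_fold (index : Int) (n : Nat) (i a : Int) :
    (PySem.List.pyRange 0 n 1).foldl (fun count j =>
      if i ≠ index ∨ j ≠ index then count + 1 else count) a
    = a + n - (if i = index ∧ 0 ≤ index ∧ index < (n:Int) then 1 else 0) := by
  induction n generalizing a with
  | zero => simp [PySem.List.pyRange_one_eq_nil]; omega
  | succ n ih =>
    have hc : ((n+1 : Nat) : Int) = (n:Int) + 1 := by push_cast; ring
    rw [hc, PySem.List.pyRange_one_succ_right (Int.natCast_nonneg n), List.foldl_append, ih]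
    simp only [List.foldl_cons, List.foldl_nil]
    split_ifs <;> push_cast at * <;> omega

-- A's outer loop over range(m), each pass running the inner loop over range(n).
theorem TN_outer_fold (index : Int) (n m : Nat) (a : Int) :
    (PySem.List.pyRange 0 m 1).foldl (fun count i =>
      (PySem.List.pyRange 0 n 1).foldl (fun count j =>
        if i ≠ index ∨ j ≠ index then count + 1 else count) count) a
    = a + m * n - (if 0 ≤ index ∧ index < (m:Int) ∧ index < (n:Int) then 1 else 0) := by
  induction m generalizing a with
  | zero => simp [PySem.List.pyRange_one_eq_nil]; omega
  | succ m ih =>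
    have hc : ((m+1 : Nat) : Int) = (m:Int) + 1 := by push_cast; ring
    rw [hc, PySem.List.pyRange_one_succ_right (Int.natCast_nonneg m), List.foldl_append, ih]
    simp only [List.foldl_cons, List.foldl_nil, TN_inner_fold]
    have hm : ((m:Int)+1)*(n:Int) = (m:Int)*(n:Int) + n := by ring
    split_ifs <;> push_cast at * <;> omega

-- ===== VERDICT (by name: the statement is the Claim_ definition above) =====
theorem TN_spec : Claim_equal_TN := by
  intro c_matrix index _
  unfold Spec_TN TN TN_alt
  rw [TN_outer_fold]
  split_ifs <;> push_cast at * <;> omega
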